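-- pv_equiv track=rewrite | github.com/pradykst/AoC_solution | Day3_1.py | best_for_line
-- ===== SOURCE A (Python) =====
-- def best_for_line(line:str)-> int:
--     line=line.strip()
--     if len(line)<2:
--         return 0
--
--
--     digits =[int(c) for c in line]
--     n=len(digits)
--
--     max_first=max(digits[:-1])
--
--     first_idx=None
--     for i in range(n-1):
--         if digits[i]==max_first:
--             first_idx=i
--             break
--
--
--
--     second_digit=max(digits[first_idx+1:])
--
--     return 10*max_first+second_digit
-- ===== SOURCE B (Python) =====
-- def best_for_line(line: str) -> int:
--     line = line.strip()
--     if len(line) < 2: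
--         return 0
--     digits = [int(c) for c in line]
--     n = len(digits)
--     return max(10 * digits[i] + digits[j] for i in range(n) for j in range(i + 1, n))
-- ===== Notes on version B (the rewrite author's own statement) =====
-- stated objective: simpler
-- what changed: A's three passes (max over digits[:-1], a scan for its first index, max over the suffix after it) are replaced by a single brute-force maximum over all ordered index pairs i < j of 10*digits[i] + digits[j].
import Mathlib
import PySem

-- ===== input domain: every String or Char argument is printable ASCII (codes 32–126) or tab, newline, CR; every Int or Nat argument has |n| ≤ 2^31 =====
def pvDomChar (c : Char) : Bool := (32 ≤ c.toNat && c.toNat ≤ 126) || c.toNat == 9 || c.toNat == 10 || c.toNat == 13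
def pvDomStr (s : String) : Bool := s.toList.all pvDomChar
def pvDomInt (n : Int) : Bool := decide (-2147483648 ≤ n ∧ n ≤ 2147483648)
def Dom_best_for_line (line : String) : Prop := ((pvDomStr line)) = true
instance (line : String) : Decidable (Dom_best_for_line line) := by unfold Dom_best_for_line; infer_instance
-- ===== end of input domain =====

-- B replaces A's three passes (prefix max, first-index scan, suffix max) by one
-- brute-force maximum over all ordered index pairs (i < j); objective: simpler.

-- shared helper: the identical Python line 'digits = [int(c) for c in line]' in A and B;
-- int(c) is PySem.Int.ofChars? — its ValueError (none) on a non-digit char is excluded by Pre_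
def pvToDigits (cs : List Char) : List Int :=
  cs.map (fun c => (PySem.Int.ofChars? [c]).getD 0)

-- ===== PORT A =====
-- the 'for i in range(n-1): if digits[i]==max_first: first_idx=i; break' loop
def pvFindFirst (digits : List Int) (m : Int) : List Int → Option Int
  | [] => none
  | i :: rest =>
    if PySem.List.pyGetD digits i 0 = m then some i else pvFindFirst digits m rest

-- A's code after the 'digits =' line
def pvACore (digits : List Int) : Int :=
  let n : Int := digits.length
  -- max(digits[:-1]); the list is nonempty here (n ≥ 2), so Python's ValueError (none) is unreachable
  let max_first := (PySem.List.max? (PySem.List.slice digits none (some (-1))) (fun x => x)).getD 0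
  match pvFindFirst digits max_first (PySem.List.pyRange 0 (n - 1) 1) with
  | none => 0  -- unreachable: max_first occurs in digits[:-1] (Python would raise TypeError on None)
  | some first_idx =>
    -- max(digits[first_idx+1:]); nonempty here, ValueError unreachable
    let second_digit :=
      (PySem.List.max? (PySem.List.slice digits (some (first_idx + 1)) none) (fun x => x)).getD 0
    10 * max_first + second_digit

def best_for_line (line : String) : Int :=
  let s := (PySem.Str.strip line).toList
  if s.length < 2 then 0
  else pvACore (pvToDigits s)

-- ===== PORT B =====
-- B's code after the 'digits =' line: max over all pairs i < j (nonempty since n ≥ 2)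
def pvBCore (digits : List Int) : Int :=
  let n : Int := digits.length
  let cands := (PySem.List.pyRange 0 n 1).flatMap (fun i =>
    (PySem.List.pyRange (i + 1) n 1).map (fun j =>
      10 * PySem.List.pyGetD digits i 0 + PySem.List.pyGetD digits j 0))
  (PySem.List.max? cands (fun x => x)).getD 0

def best_for_line_alt (line : String) : Int :=
  let s := (PySem.Str.strip line).toList
  if s.length < 2 then 0
  else pvBCore (pvToDigits s)

-- ===== PRECONDITION & SPEC =====
-- Pre_ excludes exactly the inputs on which Python A raises ValueError: a stripped line of
-- length ≥ 2 containing a non-digit character (int(c) fails); B raises there too.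
def Pre_best_for_line (line : String) : Prop :=
  (PySem.Str.strip line).toList.length < 2 ∨
    PySem.Chars.strIsdigit (PySem.Str.strip line).toList = true
instance (line : String) : Decidable (Pre_best_for_line line) := by
  unfold Pre_best_for_line; infer_instance

def pvWitness_best_for_line : String := "2954"

def Spec_best_for_line (line : String) (out : Int) : Prop := out = best_for_line_alt line
instance (line : String) (out : Int) : Decidable (Spec_best_for_line line out) := by
  unfold Spec_best_for_line; infer_instance

-- ===== CLAIM (what is proved, stated in full; the proofs are below) =====
def Claim_equal_best_for_line : Prop :=
  ∀ (line : String), Dom_best_for_line line → Pre_best_for_line line →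
    Spec_best_for_line line (best_for_line line)

-- ===== LEMMAS AND PROOFS =====

theorem pv_ofChars_digit (c : Char) (h : PySem.Chars.isdigit c = true) :
    PySem.Int.ofChars? [c] = some ((c.toNat : Int) - 48) := by
  simp [PySem.Chars.isdigit, Char.le_def] at h
  rw [UInt32.le_iff_toNat_le, UInt32.le_iff_toNat_le] at h
  simp at h
  have hc : c = Char.ofNat c.toNat := (Char.ofNat_toNat c).symm
  have h48 : c.toNat = 48 ∨ c.toNat = 49 ∨ c.toNat = 50 ∨ c.toNat = 51 ∨ c.toNat = 52 ∨
      c.toNat = 53 ∨ c.toNat = 54 ∨ c.toNat = 55 ∨ c.toNat = 56 ∨ c.toNat = 57 := by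
    omega
  rcases h48 with h'|h'|h'|h'|h'|h'|h'|h'|h'|h' <;> rw [hc, h'] <;> decide

theorem pv_digits_bounds (cs : List Char) (h : ∀ c ∈ cs, PySem.Chars.isdigit c = true) :
    ∀ x ∈ pvToDigits cs, 0 ≤ x ∧ x ≤ 9 := by
  intro x hx
  simp [pvToDigits, List.mem_map] at hx
  obtain ⟨c, hc, rfl⟩ := hx
  have hd0 := h c hc
  rw [pv_ofChars_digit c hd0]
  simp [PySem.Chars.isdigit, Char.le_def] at hd0
  rw [UInt32.le_iff_toNat_le, UInt32.le_iff_toNat_le] at hd0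
  simp at hd0
  simp
  omega

theorem pvFindFirst_spec (l : List Int) (m : Int) :
    ∀ (fuel : Nat) (a b : Int), (b - a).toNat ≤ fuel →
    (∃ i : Int, a ≤ i ∧ i < b ∧ PySem.List.pyGetD l i 0 = m) →
    ∃ i0, pvFindFirst l m (PySem.List.pyRange a b 1) = some i0 ∧ a ≤ i0 ∧ i0 < b ∧
      PySem.List.pyGetD l i0 0 = m ∧ ∀ k, a ≤ k → k < i0 → PySem.List.pyGetD l k 0 ≠ m := by
  intro fuel
  induction fuel with
  | zero =>
    intro a b hf ⟨i, hi1, hi2, _⟩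
    omega
  | succ f ih =>
    intro a b hf hex
    obtain ⟨i, hi1, hi2, hi3⟩ := hex
    have hab : a < b := by omega
    rw [PySem.List.pyRange_one_cons hab]
    unfold pvFindFirst
    by_cases h : PySem.List.pyGetD l a 0 = m
    · exact ⟨a, by simp [h], le_refl a, hab, h, fun k hk1 hk2 _ => by omega⟩
    · simp [h]
      have hia : a + 1 ≤ i := by
        rcases lt_or_ge a i with h' | h'
        · omega
        · exfalso; exact h (by rwa [show a = i by omega])
      obtain ⟨i0, heq, h1, h2, h3, h4⟩ :=
        ih (a + 1) b (by omega) ⟨i, hia, hi2, hi3⟩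
      refine ⟨i0, heq, by omega, h2, h3, fun k hk1 hk2 => ?_⟩
      rcases eq_or_lt_of_le hk1 with h' | h'
      · rwa [← h']
      · exact h4 k (by omega) hk2

-- the heart of the equivalence: on a list of digits of length ≥ 2, A's prefix-max /
-- first-index / suffix-max value equals B's maximum over all ordered pairs
theorem pvCore_eq (d : List Int) (hl : 2 ≤ d.length)
    (hd : ∀ x ∈ d, 0 ≤ x ∧ x ≤ 9) : pvACore d = pvBCore d := by
  have hdlLen : d.dropLast.length = d.length - 1 := List.length_dropLast
  have hdl : d.dropLast ≠ [] := by
    intro h; rw [h] at hdlLen; simp at hdlLen; omega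
  obtain ⟨M, hM⟩ : ∃ M, PySem.List.max? d.dropLast (fun x => x) = some M := by
    cases h : PySem.List.max? d.dropLast (fun x => x) with
    | none => exact absurd ((PySem.List.max?_eq_none_iff d.dropLast fun x => x).mp h) hdl
    | some m => exact ⟨m, rfl⟩
  have hMmem : M ∈ d.dropLast := PySem.List.max?_mem hM
  have hMmax : ∀ y ∈ d.dropLast, y ≤ M := fun y hy => PySem.List.max?_isMax hM y hy
  obtain ⟨kM, hkM0, hkMv⟩ := List.mem_iff_getElem.mp hMmem
  have hkM : kM < d.length - 1 := by omega
  rw [List.getElem_dropLast] at hkMv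
  have hget : ∀ (k : Nat) (hk : k < d.length), PySem.List.pyGetD d (k : Int) 0 = d[k] := by
    intro k hk
    rw [PySem.List.pyGetD_natCast, List.getD_eq_getElem d 0 hk]
  obtain ⟨i0, heq, h1, h2, h3, h4⟩ :=
    pvFindFirst_spec d M ((d.length : Int) - 1).toNat 0 ((d.length : Int) - 1) (by omega)
      ⟨(kM : Int), by omega, by omega, by rw [hget kM (by omega)]; exact hkMv⟩
  obtain ⟨i0n, rfl⟩ : ∃ m : Nat, i0 = (m : Int) := ⟨i0.toNat, (Int.toNat_of_nonneg h1).symm⟩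
  have hi0n : i0n < d.length - 1 := by omega
  have hi0v : d[i0n]'(by omega) = M := by rw [← hget i0n (by omega)]; exact h3
  -- the suffix slice
  have hcast : ((i0n : Int) + 1) = ((i0n + 1 : Nat) : Int) := by push_cast; ring
  have hdrLen : (d.drop (i0n + 1)).length = d.length - (i0n + 1) := List.length_drop
  have hdr : d.drop (i0n + 1) ≠ [] := by
    intro h; rw [h] at hdrLen; simp at hdrLen; omega
  obtain ⟨S, hS⟩ : ∃ S, PySem.List.max? (d.drop (i0n + 1)) (fun x => x) = some S := by
    cases h : PySem.List.max? (d.drop (i0n + 1)) (fun x => x) with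
    | none => exact absurd ((PySem.List.max?_eq_none_iff _ fun x => x).mp h) hdr
    | some m => exact ⟨m, rfl⟩
  have hSmem : S ∈ d.drop (i0n + 1) := PySem.List.max?_mem hS
  have hSmax : ∀ y ∈ d.drop (i0n + 1), y ≤ S := fun y hy => PySem.List.max?_isMax hS y hy
  have hSd : S ∈ d := List.mem_of_mem_drop hSmem
  -- reduce A's side
  unfold pvACore
  rw [PySem.List.slice_to_neg_one, hM]
  simp only [Option.getD_some]
  rw [heq]
  dsimp only
  rw [hcast, PySem.List.slice_from_natCast, hS]
  simp only [Option.getD_some]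
  -- B's side: the candidate list
  unfold pvBCore
  dsimp only
  set n : Int := (d.length : Int) with hn
  set cands := (PySem.List.pyRange 0 n 1).flatMap (fun i =>
    (PySem.List.pyRange (i + 1) n 1).map (fun j =>
      10 * PySem.List.pyGetD d i 0 + PySem.List.pyGetD d j 0)) with hcands
  obtain ⟨kS, hkS0, hkSv⟩ := List.mem_iff_getElem.mp hSmem
  have hkS : kS < d.length - (i0n + 1) := by omega
  rw [List.getElem_drop] at hkSv
  have hmemA : 10 * M + S ∈ cands := by
    rw [hcands, List.mem_flatMap]
    refine ⟨(i0n : Int), ?_, ?_⟩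
    · rw [PySem.List.mem_pyRange_one]
      exact ⟨by omega, by omega⟩
    · rw [List.mem_map]
      refine ⟨((i0n + 1 + kS : Nat) : Int), ?_, ?_⟩
      · rw [PySem.List.mem_pyRange_one]
        constructor
        · push_cast; omega
        · rw [hn]; push_cast; omega
      · rw [hget i0n (by omega), hget (i0n + 1 + kS) (by omega), hkSv, hi0v]
  have hne : cands ≠ [] := fun h => by rw [h] at hmemA; simp at hmemA
  obtain ⟨B, hB⟩ : ∃ B, PySem.List.max? cands (fun x => x) = some B := by
    cases h : PySem.List.max? cands (fun x => x) with
    | none => exact absurd ((PySem.List.max?_eq_none_iff _ fun x => x).mp h) hne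
    | some m => exact ⟨m, rfl⟩
  rw [hB]
  simp only [Option.getD_some]
  have hAB : 10 * M + S ≤ B := PySem.List.max?_isMax hB _ hmemA
  have hBA : B ≤ 10 * M + S := by
    have hBmem : B ∈ cands := PySem.List.max?_mem hB
    rw [hcands, List.mem_flatMap] at hBmem
    obtain ⟨i, hi, hBmem⟩ := hBmem
    rw [PySem.List.mem_pyRange_one] at hi
    rw [List.mem_map] at hBmem
    obtain ⟨j, hj, hBv⟩ := hBmem
    rw [PySem.List.mem_pyRange_one] at hj
    obtain ⟨in', rfl⟩ : ∃ m : Nat, i = (m : Int) := ⟨i.toNat, (Int.toNat_of_nonneg hi.1).symm⟩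
    obtain ⟨jn, rfl⟩ : ∃ m : Nat, j = (m : Int) := ⟨j.toNat, (Int.toNat_of_nonneg (by omega)).symm⟩
    have hjn : jn < d.length := by rw [hn] at hj; omega
    have hinj : in' + 1 ≤ jn := by omega
    have hin : in' < d.length - 1 := by omega
    rw [hget in' (by omega), hget jn hjn] at hBv
    have ha_le : d[in']'(by omega) ≤ M := by
      apply hMmax
      rw [List.mem_iff_getElem]
      exact ⟨in', by omega, by rw [List.getElem_dropLast]⟩
    have hb_bounds := hd _ (List.getElem_mem hjn)
    have hS_bounds := hd _ hSd
    rcases lt_or_eq_of_le ha_le with hlt | heqM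
    · omega
    · have hi0le : i0n ≤ in' := by
        by_contra hcon
        exact h4 (in' : Int) (by omega) (by omega)
          (by rw [hget in' (by omega)]; exact heqM)
      have hjS : d[jn] ≤ S := by
        apply hSmax
        rw [List.mem_iff_getElem]
        refine ⟨jn - (i0n + 1), by omega, ?_⟩
        rw [List.getElem_drop]
        congr 1
        omega
      omega
  omega

theorem best_for_line_spec : Claim_equal_best_for_line := by
  intro line _hdom hpre
  unfold Spec_best_for_line best_for_line best_for_line_alt
  dsimp only
  by_cases h : (PySem.Str.strip line).toList.length < 2
  · rw [if_pos h, if_pos h]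
  · rw [if_neg h, if_neg h]
    apply pvCore_eq
    · rw [pvToDigits, List.length_map]
      omega
    · apply pv_digits_bounds
      rcases hpre with h' | h'
      · omega
      · simp only [PySem.Chars.strIsdigit, Bool.and_eq_true, List.all_eq_true] at h'
        exact fun c hc => h'.2 c hc
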